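-- pv_equiv track=rewrite | github.com/garrettrickhouse/campaign-reporting-2 | main.py | get_available_filters
-- ===== SOURCE A (Python) =====
-- def get_available_filters(ad_objects):
--     """
--     Get all available filter values from the ad objects
--
--     Returns:
--         dict: Available filter options
--     """
--     filters = {
--         'campaign_types': set(),
--         'products': set(),
--         'agencies': set(),
--         'ad_types': set(),
--         'creators': set()
--     }
--
--     for ad in ad_objects:
--         metadata = ad['metadata']
--         filters['campaign_types'].add(metadata.get('campaign_type', 'Unknown'))
--         filters['products'].add(metadata.get('product', 'Unknown'))
--         filters['agencies'].add(metadata.get('agency', 'Unknown'))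
--         filters['ad_types'].add(metadata.get('ad_type', 'Unknown'))
--         filters['creators'].add(metadata.get('creator', 'Unknown'))
--
--     # Convert sets to sorted lists
--     return {key: sorted(list(value)) for key, value in filters.items()}
-- ===== SOURCE B (Python) =====
-- def get_available_filters(ad_objects):
--     """
--     Get all available filter values from the ad objects
--
--     Returns:
--         dict: Available filter options
--     """
--     fields = {
--         'campaign_types': 'campaign_type',
--         'products': 'product',
--         'agencies': 'agency',
--         'ad_types': 'ad_type',
--         'creators': 'creator',
--     }
--     ads = list(ad_objects)
--     return {out: sorted({ad['metadata'].get(src, 'Unknown') for ad in ads})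
--             for out, src in fields.items()}
-- ===== Notes on version B (the rewrite author's own statement) =====
-- stated objective: idiomatic
-- what changed: Replaces the single fused pass that mutates five named sets with a key-mapping table and one set-comprehension pass per filter field, returned as a dict comprehension.
import Mathlib
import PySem

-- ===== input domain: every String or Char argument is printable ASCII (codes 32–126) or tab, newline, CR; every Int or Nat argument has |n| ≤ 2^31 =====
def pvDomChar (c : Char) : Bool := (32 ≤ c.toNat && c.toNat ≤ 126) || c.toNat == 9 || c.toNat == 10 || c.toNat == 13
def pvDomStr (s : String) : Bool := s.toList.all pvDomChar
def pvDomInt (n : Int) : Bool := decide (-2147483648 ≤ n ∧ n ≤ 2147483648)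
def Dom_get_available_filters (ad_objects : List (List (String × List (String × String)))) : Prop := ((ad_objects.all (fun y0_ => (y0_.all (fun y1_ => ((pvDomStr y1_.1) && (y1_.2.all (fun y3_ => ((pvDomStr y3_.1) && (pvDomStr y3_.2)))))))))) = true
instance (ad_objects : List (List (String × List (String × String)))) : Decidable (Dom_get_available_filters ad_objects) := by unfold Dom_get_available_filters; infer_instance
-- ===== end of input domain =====

-- B restructures A (idiomatic): A's single fused pass mutating five named sets becomes a
-- key-mapping table with one set-comprehension pass per filter field. Return value only.

-- ad['metadata'] as a dict; total form, exact wherever the key is present (Pre_ below)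
def pvMeta (ad : List (String × List (String × String))) : PySem.Dict String String :=
  PySem.Dict.ofList (((PySem.Dict.ofList ad).get? "metadata").getD [])

-- ===== PORT A =====
def get_available_filters (ad_objects : List (List (String × List (String × String)))) : List (String × List String) :=
  let st := ad_objects.foldl
    (fun (st : PySem.Set String × PySem.Set String × PySem.Set String × PySem.Set String × PySem.Set String) ad =>
      let md := pvMeta ad
      (PySem.Set.add st.1 (md.getD "campaign_type" "Unknown"),
       PySem.Set.add st.2.1 (md.getD "product" "Unknown"),
       PySem.Set.add st.2.2.1 (md.getD "agency" "Unknown"),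
       PySem.Set.add st.2.2.2.1 (md.getD "ad_type" "Unknown"),
       PySem.Set.add st.2.2.2.2 (md.getD "creator" "Unknown")))
    (PySem.Set.empty, PySem.Set.empty, PySem.Set.empty, PySem.Set.empty, PySem.Set.empty)
  [("campaign_types", PySem.List.sorted st.1 (fun x => x) false),
   ("products", PySem.List.sorted st.2.1 (fun x => x) false),
   ("agencies", PySem.List.sorted st.2.2.1 (fun x => x) false),
   ("ad_types", PySem.List.sorted st.2.2.2.1 (fun x => x) false),
   ("creators", PySem.List.sorted st.2.2.2.2 (fun x => x) false)]

-- ===== PORT B =====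
def get_available_filters_alt (ad_objects : List (List (String × List (String × String)))) : List (String × List String) :=
  [("campaign_types", "campaign_type"), ("products", "product"), ("agencies", "agency"),
   ("ad_types", "ad_type"), ("creators", "creator")].map
    (fun p =>
      (p.1, PySem.List.sorted
              (PySem.Set.ofList (ad_objects.map (fun ad => (pvMeta ad).getD p.2 "Unknown")))
              (fun x => x) false))

-- ===== PRECONDITION & SPEC =====
-- Pre_ excludes exactly the inputs where some ad lacks the 'metadata' key: there Python A raises KeyError.
def Pre_get_available_filters (ad_objects : List (List (String × List (String × String)))) : Prop :=
  (ad_objects.all (fun ad => ((PySem.Dict.ofList ad).get? "metadata").isSome)) = true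
instance (ad_objects : List (List (String × List (String × String)))) : Decidable (Pre_get_available_filters ad_objects) := by unfold Pre_get_available_filters; infer_instance

def pvWitness_get_available_filters : (List (List (String × List (String × String)))) :=
  [[("metadata", [("product", "Widget"), ("agency", "Acme")])],
   [("metadata", [("product", "Gadget")])]]

def Spec_get_available_filters (ad_objects : List (List (String × List (String × String)))) (out : List (String × List String)) : Prop := out = get_available_filters_alt ad_objects
instance (ad_objects : List (List (String × List (String × String)))) (out : List (String × List String)) : Decidable (Spec_get_available_filters ad_objects out) := by unfold Spec_get_available_filters; infer_instance

-- ===== CLAIM (what is proved, stated in full; the proofs are below) =====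
def Claim_equal_get_available_filters : Prop := ∀ (ad_objects : List (List (String × List (String × String)))), Dom_get_available_filters ad_objects → Pre_get_available_filters ad_objects → Spec_get_available_filters ad_objects (get_available_filters ad_objects)

-- ===== LEMMAS AND PROOFS =====

-- the fused five-set fold is the tuple of five independent folds
theorem fused_fold {α : Type} (g1 g2 g3 g4 g5 : α → String) (ads : List α)
    (s1 s2 s3 s4 s5 : PySem.Set String) :
    ads.foldl
      (fun (st : PySem.Set String × PySem.Set String × PySem.Set String × PySem.Set String × PySem.Set String) ad =>
        (PySem.Set.add st.1 (g1 ad), PySem.Set.add st.2.1 (g2 ad), PySem.Set.add st.2.2.1 (g3 ad),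
         PySem.Set.add st.2.2.2.1 (g4 ad), PySem.Set.add st.2.2.2.2 (g5 ad)))
      (s1, s2, s3, s4, s5)
    = (ads.foldl (fun s ad => PySem.Set.add s (g1 ad)) s1,
       ads.foldl (fun s ad => PySem.Set.add s (g2 ad)) s2,
       ads.foldl (fun s ad => PySem.Set.add s (g3 ad)) s3,
       ads.foldl (fun s ad => PySem.Set.add s (g4 ad)) s4,
       ads.foldl (fun s ad => PySem.Set.add s (g5 ad)) s5) := by
  induction ads generalizing s1 s2 s3 s4 s5 with
  | nil => rfl
  | cons a t ih => simp [List.foldl_cons, ih]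

-- set(map f ads) as the fold A performs for one field
theorem ofList_map_eq_foldl {α : Type} (f : α → String) (ads : List α) :
    PySem.Set.ofList (ads.map f) = ads.foldl (fun s ad => PySem.Set.add s (f ad)) PySem.Set.empty := by
  rw [PySem.Set.ofList_eq_foldl, List.foldl_map]; rfl

-- ===== VERDICT (by name: the statement is the Claim_ definition above) =====
theorem get_available_filters_spec : Claim_equal_get_available_filters := by
  intro ads _ _
  unfold Spec_get_available_filters get_available_filters get_available_filters_alt
  simp only [fused_fold, ofList_map_eq_foldl, List.map]
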